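-- pv_equiv track=rewrite | github.com/MrBrantCode/unitest_baseline | mut_generate/mist_train_cf/cf_95633/solution.py | max_adjacent
-- ===== SOURCE A (Python) =====
-- def max_adjacent(arr):
--     max_count = 0
--     start_index = -1
--     end_index = -1
--
--     count = 0
--     current_start = -1
--
--     for i in range(len(arr)):
--         if arr[i] % 3 == 0:
--             count += 1
--             if current_start == -1:
--                 current_start = i
--         else:
--             if count > max_count:
--                 max_count = count
--                 start_index = current_start
--                 end_index = i - 1
--
--             count = 0
--             current_start = -1
--
--     if count > max_count:
--         max_count = count
--         start_index = current_start
--         end_index = len(arr) - 1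
--
--     return start_index, end_index, max_count
-- ===== SOURCE B (Python) =====
-- def max_adjacent(arr):
--     # Phase 1: partition into maximal runs of multiples of 3 -> (start, length)
--     runs = []
--     n = len(arr)
--     i = 0
--     while i < n:
--         if arr[i] % 3 == 0:
--             j = i
--             while j < n and arr[j] % 3 == 0:
--                 j += 1
--             runs.append((i, j - i))
--             i = j
--         else:
--             i += 1
--     # Phase 2: select the first run strictly longer than the best so far
--     best = (-1, -1, 0)
--     for start, length in runs:
--         if length > best[2]:
--             best = (start, start + length - 1, length)
--     return best
-- ===== Notes on version B (the rewrite author's own statement) =====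
-- stated objective: alternative
-- what changed: Replaced A's inline counter/best-so-far single scan with a two-phase computation: first materialize all maximal runs of multiples of 3 as (start, length) segments, then select the earliest strictly-longest run.
import Mathlib
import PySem

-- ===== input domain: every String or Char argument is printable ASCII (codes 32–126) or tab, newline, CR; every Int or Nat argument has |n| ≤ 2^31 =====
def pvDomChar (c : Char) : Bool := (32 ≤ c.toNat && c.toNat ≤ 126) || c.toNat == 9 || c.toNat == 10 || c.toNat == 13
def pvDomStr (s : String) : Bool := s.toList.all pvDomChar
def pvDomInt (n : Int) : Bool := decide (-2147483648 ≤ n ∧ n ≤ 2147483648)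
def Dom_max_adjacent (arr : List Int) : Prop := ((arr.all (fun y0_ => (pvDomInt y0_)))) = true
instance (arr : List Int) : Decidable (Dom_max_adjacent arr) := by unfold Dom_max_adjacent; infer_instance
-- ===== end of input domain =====

-- B is an alternative of the same cost: it first materializes the maximal runs of
-- multiples of 3 as (start, length) segments and then selects the earliest strictly
-- longest run, instead of A's inline counter/best-so-far single scan.

-- ===== PORT A =====
-- state = (max_count, start_index, end_index, count, current_start); the for loop
-- over range(len(arr)) becomes structural recursion carrying the index i.
def loopA : List Int → Int → (Int × Int × Int × Int × Int) → (Int × Int × Int × Int × Int)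
  | [], _, s => s
  | x :: xs, i, (mc, si, ei, cnt, cs) =>
    if PySem.Int.mod x 3 = 0 then
      loopA xs (i + 1) (mc, si, ei, cnt + 1, if cs = -1 then i else cs)
    else
      if cnt > mc then loopA xs (i + 1) (cnt, cs, i - 1, 0, -1)
      else loopA xs (i + 1) (mc, si, ei, 0, -1)

-- the final `if count > max_count` after the loop
def finishA (n : Int) (s : Int × Int × Int × Int × Int) : Int × Int × Int :=
  if s.2.2.2.1 > s.1 then (s.2.2.2.2, n - 1, s.2.2.2.1) else (s.2.1, s.2.2.1, s.1)

def max_adjacent (arr : List Int) : Int × Int × Int :=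
  finishA (arr.length : Int) (loopA arr 0 (0, -1, -1, 0, -1))

-- ===== PORT B =====
-- inner `while j < n and arr[j] % 3 == 0` of Source B: counts the leading multiples
-- of 3 and returns (their number, the remaining suffix)
def takeRun : List Int → Int × List Int
  | [] => (0, [])
  | x :: xs =>
    if PySem.Int.mod x 3 = 0 then
      let p := takeRun xs
      (p.1 + 1, p.2)
    else (0, x :: xs)

-- (termination measure for buildRuns)
theorem takeRun_len : ∀ (xs : List Int), (takeRun xs).2.length ≤ xs.length := by
  intro xs
  induction xs with
  | nil => simp [takeRun]
  | cons x xs ih =>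
    simp only [takeRun]
    split
    · exact Nat.le_succ_of_le ih
    · simp

-- outer `while i < n` loop of Source B building the runs list
def buildRuns : List Int → Int → List (Int × Int)
  | [], _ => []
  | x :: xs, i =>
    if PySem.Int.mod x 3 = 0 then
      let p := takeRun xs
      (i, p.1 + 1) :: buildRuns p.2 (i + p.1 + 1)
    else buildRuns xs (i + 1)
  termination_by l _ => l.length
  decreasing_by
  · exact Nat.lt_succ_of_le (takeRun_len xs)
  · simp

-- Phase 2: keep the first run strictly longer than the best so far
def stepB (b : Int × Int × Int) (r : Int × Int) : Int × Int × Int :=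
  if r.2 > b.2.2 then (r.1, r.1 + r.2 - 1, r.2) else b

def max_adjacent_alt (arr : List Int) : Int × Int × Int :=
  (buildRuns arr 0).foldl stepB (-1, -1, 0)

-- ===== PRECONDITION & SPEC =====
def Spec_max_adjacent (arr : List Int) (out : Int × Int × Int) : Prop := out = max_adjacent_alt arr
instance (arr : List Int) (out : Int × Int × Int) : Decidable (Spec_max_adjacent arr out) := by unfold Spec_max_adjacent; infer_instance

-- ===== CLAIM (what is proved, stated in full; the proofs are below) =====
def Claim_equal_max_adjacent : Prop := ∀ (arr : List Int), Dom_max_adjacent arr → Spec_max_adjacent arr (max_adjacent arr)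

-- ===== LEMMAS AND PROOFS =====

theorem takeRun_nonneg : ∀ (xs : List Int), 0 ≤ (takeRun xs).1 := by
  intro xs
  induction xs with
  | nil => simp [takeRun]
  | cons x xs ih =>
    simp only [takeRun]
    split
    · simp only []; omega
    · simp

-- takeRun consumes exactly the leading multiples of 3
theorem takeRun_count : ∀ (xs : List Int),
    (takeRun xs).1 + ((takeRun xs).2.length : Int) = (xs.length : Int) := by
  intro xs
  induction xs with
  | nil => simp [takeRun]
  | cons x xs ih =>
    simp only [takeRun, List.length_cons]
    split
    · simp only []
      push_cast at ih ⊢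
      omega
    · simp

-- the remainder of takeRun starts with a non-multiple (or is empty)
theorem takeRun_rest : ∀ (xs : List Int),
    (takeRun xs).2 = [] ∨
      ∃ y ys, (takeRun xs).2 = y :: ys ∧ ¬ PySem.Int.mod y 3 = 0 := by
  intro xs
  induction xs with
  | nil => left; simp [takeRun]
  | cons x xs ih =>
    simp only [takeRun]
    split
    · exact ih
    · right; exact ⟨x, xs, rfl, by assumption⟩

-- A's loop runs through an open run exactly as takeRun describes
theorem loopA_run : ∀ (xs : List Int) (i mc si ei cnt cs : Int), cs ≠ -1 →
    loopA xs i (mc, si, ei, cnt, cs)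
      = loopA (takeRun xs).2 (i + (takeRun xs).1) (mc, si, ei, cnt + (takeRun xs).1, cs) := by
  intro xs
  induction xs with
  | nil => intro i mc si ei cnt cs _; simp [takeRun, loopA]
  | cons x xs ih =>
    intro i mc si ei cnt cs hcs
    by_cases h : PySem.Int.mod x 3 = 0
    · have ht : takeRun (x :: xs) = ((takeRun xs).1 + 1, (takeRun xs).2) := by
        simp only [takeRun]; rw [if_pos h]
      have hA : loopA (x :: xs) i (mc, si, ei, cnt, cs)
          = loopA xs (i + 1) (mc, si, ei, cnt + 1, cs) := by
        simp only [loopA]; rw [if_pos h, if_neg hcs]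
      rw [ht, hA, ih (i + 1) mc si ei (cnt + 1) cs hcs]
      have e1 : i + 1 + (takeRun xs).1 = i + ((takeRun xs).1 + 1) := by ring
      have e2 : cnt + 1 + (takeRun xs).1 = cnt + ((takeRun xs).1 + 1) := by ring
      rw [e1, e2]
    · have ht : takeRun (x :: xs) = (0, x :: xs) := by
        simp only [takeRun]; rw [if_neg h]
      rw [ht]
      simp

-- Main invariant: starting from a closed-run state with best-so-far (s, e, m)
-- (with 0 ≤ m), finishing A's scan started at offset i equals folding B's
-- selection, seeded with (s, e, m), over the runs of the suffix found from i.
theorem main_inv : ∀ (k : Nat) (arr : List Int) (i s e m : Int),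
    arr.length ≤ k → 0 ≤ i → 0 ≤ m →
    finishA (i + (arr.length : Int)) (loopA arr i (m, s, e, 0, -1))
      = (buildRuns arr i).foldl stepB (s, e, m) := by
  intro k
  induction k with
  | zero =>
    intro arr i s e m hlen hi hm
    have harr : arr = [] := List.length_eq_zero_iff.mp (Nat.le_zero.mp hlen)
    subst harr
    simp only [loopA, buildRuns, List.foldl, List.length_nil, Nat.cast_zero, add_zero, finishA]
    rw [if_neg (by omega : ¬ (0:Int) > m)]
  | succ k ih =>
    intro arr i s e m hlen hi hm
    match arr with
    | [] =>
      simp only [loopA, buildRuns, List.foldl, List.length_nil, Nat.cast_zero, add_zero, finishA]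
      rw [if_neg (by omega : ¬ (0:Int) > m)]
    | x :: xs =>
      by_cases h : PySem.Int.mod x 3 = 0
      · -- a run starts at index i
        have hA : loopA (x :: xs) i (m, s, e, 0, -1)
            = loopA xs (i + 1) (m, s, e, 1, i) := by
          simp only [loopA]; rw [if_pos h]; norm_num
        have hrun := loopA_run xs (i + 1) m s e 1 i (by omega)
        have hB : buildRuns (x :: xs) i
            = (i, (takeRun xs).1 + 1) :: buildRuns (takeRun xs).2 (i + (takeRun xs).1 + 1) := by
          simp only [buildRuns]; rw [if_pos h]
        have hcnt := takeRun_count xs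
        have hnn := takeRun_nonneg xs
        have hrest := takeRun_rest xs
        rcases hTR : takeRun xs with ⟨l, R⟩
        rw [hTR] at hcnt hnn hrest hrun hB
        simp only at hcnt hnn hrest hrun hB
        rw [hA, hrun, hB]
        rcases hrest with hR | ⟨y, ys, hR, hy⟩
        · -- the run reaches the end of the list
          subst hR
          have hx : (((x :: xs).length : Nat) : Int) = l + 1 := by
            simp only [List.length_nil, Nat.cast_zero] at hcnt
            simp only [List.length_cons]
            push_cast
            omega
          simp only [loopA, buildRuns, List.foldl_cons, List.foldl_nil, finishA, stepB]
          by_cases hgt : m < l + 1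
          · rw [if_pos (by omega : (1:Int) + l > m), if_pos (by omega : l + 1 > m)]
            simp only [Prod.mk.injEq]
            exact ⟨trivial, by omega, by omega⟩
          · rw [if_neg (by omega : ¬ (1:Int) + l > m), if_neg (by omega : ¬ l + 1 > m)]
        · -- the run is closed by a non-multiple y
          subst hR
          have hlenxs : xs.length ≤ k := by
            simp only [List.length_cons] at hlen; omega
          have hlenys : ys.length ≤ k := by
            simp only [List.length_cons] at hcnt
            push_cast at hcnt
            omega
          have hn : i + (((x :: xs).length : Nat) : Int) = (i + 1 + l + 1) + (ys.length : Int) := by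
            simp only [List.length_cons] at hcnt ⊢
            push_cast at hcnt ⊢
            omega
          have hB2 : buildRuns (y :: ys) (i + l + 1) = buildRuns ys (i + l + 1 + 1) := by
            simp only [buildRuns]; rw [if_neg hy]
          rw [hB2]
          simp only [List.foldl_cons]
          by_cases hgt : m < l + 1
          · have hA2 : loopA (y :: ys) (i + 1 + l) (m, s, e, 1 + l, i)
                = loopA ys (i + 1 + l + 1) (1 + l, i, (i + 1 + l) - 1, 0, -1) := by
              simp only [loopA]; rw [if_neg hy, if_pos (by omega : (1:Int) + l > m)]
            have hstep : stepB (s, e, m) (i, l + 1) = (i, i + (l + 1) - 1, l + 1) := by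
              simp only [stepB]; rw [if_pos (show (s, e, m).2.2 < (i, l + 1).2 from hgt)]
            rw [hA2, hstep]
            have hiu := ih ys (i + 1 + l + 1) i (i + (l + 1) - 1) (l + 1) hlenys
              (by omega) (by omega)
            have e1 : (1:Int) + l = l + 1 := by ring
            have e2 : i + 1 + l - 1 = i + (l + 1) - 1 := by ring
            have e3 : i + l + 1 + 1 = i + 1 + l + 1 := by ring
            rw [hn, e1, e2, e3]
            exact hiu
          · have hA2 : loopA (y :: ys) (i + 1 + l) (m, s, e, 1 + l, i)
                = loopA ys (i + 1 + l + 1) (m, s, e, 0, -1) := by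
              simp only [loopA]; rw [if_neg hy, if_neg (by omega : ¬ (1:Int) + l > m)]
            have hstep : stepB (s, e, m) (i, l + 1) = (s, e, m) := by
              simp only [stepB]; rw [if_neg (show ¬ (s, e, m).2.2 < (i, l + 1).2 from hgt)]
            have e3 : i + l + 1 + 1 = i + 1 + l + 1 := by ring
            rw [hA2, hstep, hn, e3]
            exact ih ys (i + 1 + l + 1) s e m hlenys (by omega) hm
      · -- not a multiple: the closed state steps on unchanged
        have hA : loopA (x :: xs) i (m, s, e, 0, -1)
            = loopA xs (i + 1) (m, s, e, 0, -1) := by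
          simp only [loopA]; rw [if_neg h, if_neg (by omega : ¬ (0:Int) > m)]
        have hB : buildRuns (x :: xs) i = buildRuns xs (i + 1) := by
          simp only [buildRuns]; rw [if_neg h]
        have hn : i + (((x :: xs).length : Nat) : Int) = (i + 1) + (xs.length : Int) := by
          simp only [List.length_cons]; push_cast; ring
        rw [hA, hB, hn]
        exact ih xs (i + 1) s e m (by simp only [List.length_cons] at hlen; omega) (by omega) hm

-- ===== VERDICT (by name: the statement is the Claim_ definition above) =====
theorem max_adjacent_spec : Claim_equal_max_adjacent := by
  intro arr _
  unfold Spec_max_adjacent max_adjacent max_adjacent_alt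
  have := main_inv arr.length arr 0 (-1) (-1) 0 le_rfl le_rfl le_rfl
  simpa using this
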